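-- pv_equiv track=rewrite | github.com/MakiyaCro/Cryptography-2021 | RSA/Crypt_Math.py | my_sqr_roots_find
-- ===== SOURCE A (Python) =====
-- def my_sqr_roots_find(a, m):
--     # First make sure a is within modulo n
--     roots = ''
--     if a > m:
--         a = a % m
--
--     # walk through all the possibilities between 1 and n
--     for i in range(1, m):
--         # s would be the square of i
--         s = i * i
--         # If i is a root add it on to the list of roots
--         if s % m == a:
--             roots = roots + str(i) + ' '
--
--     # If no roots were added to the root list then update message
--     if roots == '':
--         roots = "No Roots were found for" + str(a) + "(mod" + str(m) + ")"
--
--     return roots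
-- ===== SOURCE B (Python) =====
-- def my_sqr_roots_find(a, m):
--     # Scan only 1..m//2 and mirror each root i to m-i (roots of x^2 = a mod m come in pairs i, m-i);
--     # halves the work of A's full scan and builds the upper half back-to-front.
--     if a > m:
--         a = a % m
--     half = []
--     for i in range(1, m // 2 + 1):
--         if i * i % m == a:
--             half.append(i)
--     upper = [m - i for i in reversed(half) if i != m - i]
--     allr = half + upper
--     if not allr:
--         return "No Roots were found for" + str(a) + "(mod" + str(m) + ")"
--     return ''.join(str(i) + ' ' for i in allr)
-- ===== Notes on version B (the rewrite author's own statement) =====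
-- stated objective: faster
-- what changed: B scans only 1..m//2 and obtains the upper-half roots by mirroring each found root i to m-i (appended back-to-front), instead of A's full scan over 1..m-1; square roots mod m come in pairs (i, m-i).
import Mathlib
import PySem

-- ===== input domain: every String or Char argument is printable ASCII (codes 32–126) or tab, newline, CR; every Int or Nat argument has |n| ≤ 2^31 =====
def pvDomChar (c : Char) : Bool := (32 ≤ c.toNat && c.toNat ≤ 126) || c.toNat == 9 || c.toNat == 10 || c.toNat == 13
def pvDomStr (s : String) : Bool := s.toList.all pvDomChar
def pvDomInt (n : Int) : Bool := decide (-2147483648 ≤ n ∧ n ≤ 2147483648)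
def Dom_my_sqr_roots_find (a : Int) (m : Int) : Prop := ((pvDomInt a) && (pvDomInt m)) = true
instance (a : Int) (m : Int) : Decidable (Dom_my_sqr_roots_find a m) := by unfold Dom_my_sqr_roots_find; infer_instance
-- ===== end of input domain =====

-- B halves A's scan: it collects the roots in 1..m//2 and mirrors each root i to m-i for the upper half.

-- ===== PORT A =====
def my_sqr_roots_find (a : Int) (m : Int) : String :=
  let a := if a > m then PySem.Int.mod a m else a
  let roots := (PySem.List.pyRange 1 m 1).foldl
    (fun roots i => if PySem.Int.mod (i * i) m = a then roots ++ PySem.Int.toStr i ++ " " else roots) ""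
  if roots = "" then
    "No Roots were found for" ++ PySem.Int.toStr a ++ "(mod" ++ PySem.Int.toStr m ++ ")"
  else roots

-- ===== PORT B =====
def my_sqr_roots_find_alt (a : Int) (m : Int) : String :=
  let a := if a > m then PySem.Int.mod a m else a
  let half := (PySem.List.pyRange 1 (PySem.Int.floordiv m 2 + 1) 1).foldl
    (fun l i => if PySem.Int.mod (i * i) m = a then l ++ [i] else l) ([] : List Int)
  let upper := (half.reverse.filter (fun i => i != m - i)).map (fun i => m - i)
  let allr := half ++ upper
  if allr.isEmpty then
    "No Roots were found for" ++ PySem.Int.toStr a ++ "(mod" ++ PySem.Int.toStr m ++ ")"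
  else PySem.Str.join "" (allr.map (fun i => PySem.Int.toStr i ++ " "))

-- ===== PRECONDITION & SPEC =====
-- Pre_ excludes only m = 0 with a > 0, where A's 'a % m' raises ZeroDivisionError (B raises there too).
def Pre_my_sqr_roots_find (a : Int) (m : Int) : Prop := ¬ (m = 0 ∧ 0 < a)
instance (a : Int) (m : Int) : Decidable (Pre_my_sqr_roots_find a m) := by unfold Pre_my_sqr_roots_find; infer_instance
def pvWitness_my_sqr_roots_find : Int × Int := (1, 4)
def Spec_my_sqr_roots_find (a : Int) (m : Int) (out : String) : Prop := out = my_sqr_roots_find_alt a m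
instance (a : Int) (m : Int) (out : String) : Decidable (Spec_my_sqr_roots_find a m out) := by unfold Spec_my_sqr_roots_find; infer_instance

-- ===== CLAIM (what is proved, stated in full; the proofs are below) =====
def Claim_equal_my_sqr_roots_find : Prop := ∀ (a : Int) (m : Int), Dom_my_sqr_roots_find a m → Pre_my_sqr_roots_find a m → Spec_my_sqr_roots_find a m (my_sqr_roots_find a m)

-- ===== LEMMAS AND PROOFS =====

-- empty-separator join of a cons is the head appended to the join of the tail
theorem pv_join_cons (x : String) (xs : List String) :
    PySem.Str.join "" (x :: xs) = x ++ PySem.Str.join "" xs := by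
  apply String.ext
  cases xs with
  | nil =>
    simp [PySem.Str.toList_join, PySem.Chars.join_singleton, PySem.Chars.join_nil,
      String.toList_append]
  | cons y ys =>
    simp [PySem.Str.toList_join, PySem.Chars.join_cons_cons, String.toList_append,
      String.toList_empty]

theorem pv_join_nil : PySem.Str.join "" [] = "" := rfl

-- A's string-accumulating loop is the empty join of the parts of the filtered list
theorem pv_foldl_str (p : Int → Prop) [DecidablePred p] (f : Int → String) :
    ∀ (l : List Int) (acc : String),
      l.foldl (fun r i => if p i then r ++ f i else r) acc
        = acc ++ PySem.Str.join "" ((l.filter (fun i => decide (p i))).map f) := by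
  intro l
  induction l with
  | nil => intro acc; simp [pv_join_nil, String.append_empty]
  | cons x xs ih =>
    intro acc
    by_cases hx : p x
    · simp [List.foldl_cons, hx, ih, pv_join_cons, String.append_assoc]
    · simp [List.foldl_cons, hx, ih]

theorem pv_f_ne_nil (i : Int) : (PySem.Int.toStr i ++ " ").toList ≠ [] := by
  simp [String.toList_append]

theorem pv_join_parts_ne_nil (f : Int → String) (hf : ∀ i, (f i).toList ≠ []) :
    ∀ (l : List Int), l ≠ [] → PySem.Str.join "" (l.map f) ≠ "" := by
  intro l hl
  cases l with
  | nil => exact absurd rfl hl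
  | cons x xs =>
    rw [List.map_cons, pv_join_cons]
    intro h
    have h2 := congrArg String.toList h
    rw [String.toList_append, String.toList_empty, List.append_eq_nil_iff] at h2
    exact hf x h2.1

-- squares are symmetric about m/2
theorem pv_sq_symm (m i : Int) (hm : 0 < m) :
    PySem.Int.mod ((m - i) * (m - i)) m = PySem.Int.mod (i * i) m := by
  rw [PySem.Int.mod_eq_emod_of_pos hm, PySem.Int.mod_eq_emod_of_pos hm,
    show (m - i) * (m - i) = i * i + m * (m - 2 * i) from by ring,
    Int.add_mul_emod_self_left]

-- the upper half of the range is the mirrored, reversed lower part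
theorem pv_mirror (m h : Int) (hh : h = m / 2) :
    PySem.List.pyRange (h + 1) m 1
      = ((PySem.List.pyRange 1 (m - h) 1).map (fun i => m - i)).reverse := by
  have e : PySem.List.pyRange (m - 1) h (-1) = (PySem.List.pyRange (h + 1) m 1).reverse := by
    have e0 := PySem.List.pyRange_neg_one_eq_reverse (m - 1) h
    rwa [show m - 1 + 1 = m from by ring] at e0
  rw [← List.reverse_reverse (PySem.List.pyRange (h + 1) m 1), ← e,
    PySem.List.pyRange_neg_one, PySem.List.pyRange_one, List.map_map]
  congr 1
  rw [show (m - 1 - h).toNat = (m - h - 1).toNat from by omega]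
  exact List.map_congr_left (fun k _ => by simp only [Function.comp]; omega)

-- the heart: the filtered full range is the filtered half range plus its mirror
theorem pv_split (m : Int) (hm : 0 < m) (p : Int → Bool)
    (hsymm : ∀ i, p (m - i) = p i) :
    (PySem.List.pyRange 1 m 1).filter p
      = (PySem.List.pyRange 1 (m / 2 + 1) 1).filter p
        ++ ((((PySem.List.pyRange 1 (m / 2 + 1) 1).filter p).reverse.filter
              (fun i => i != m - i)).map (fun i => m - i)) := by
  have L : (PySem.List.pyRange (m / 2 + 1) m 1).filter p
      = ((((PySem.List.pyRange 1 (m - m / 2) 1).filter p).map (fun i => m - i))).reverse := by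
    rw [pv_mirror m (m / 2) rfl, List.filter_reverse, List.filter_map,
      List.filter_congr (fun x _ => by simp only [Function.comp]; exact hsymm x)]
  have h3 : (PySem.List.pyRange (m - m / 2) (m / 2 + 1) 1).filter
      (fun a => (a != m - a) && p a) = [] := by
    apply List.filter_eq_nil_iff.mpr
    intro x hx
    rw [PySem.List.mem_pyRange_one] at hx
    have hx2 : m - x = x := by omega
    simp [hx2]
  have h2 : (PySem.List.pyRange 1 (m - m / 2) 1).filter (fun a => (a != m - a) && p a)
      = (PySem.List.pyRange 1 (m - m / 2) 1).filter p := by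
    apply List.filter_congr
    intro x hx
    rw [PySem.List.mem_pyRange_one] at hx
    have hb : (x != m - x) = true := by
      simp only [bne_iff_ne]; omega
    simp [hb]
  have R : ((((PySem.List.pyRange 1 (m / 2 + 1) 1).filter p).reverse.filter
        (fun i => i != m - i)).map (fun i => m - i))
      = ((((PySem.List.pyRange 1 (m - m / 2) 1).filter p).map (fun i => m - i))).reverse := by
    rw [List.filter_reverse, List.map_reverse]
    congr 1
    rw [List.filter_filter,
      PySem.List.pyRange_one_append 1 (m - m / 2) (m / 2 + 1) (by omega) (by omega),
      List.filter_append, h3, h2, List.append_nil]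
  rw [PySem.List.pyRange_one_append 1 (m / 2 + 1) m (by omega) (by omega),
    List.filter_append]
  congr 1
  rw [L, R]


-- ===== VERDICT (by name: the statement is the Claim_ definition above) =====
theorem my_sqr_roots_find_spec : Claim_equal_my_sqr_roots_find := by
  intro a m hDom hPre
  unfold Spec_my_sqr_roots_find
  simp only [my_sqr_roots_find, my_sqr_roots_find_alt]
  set a' := if a > m then PySem.Int.mod a m else a with ha'
  by_cases hm : 0 < m
  · have hfd : PySem.Int.floordiv m 2 = m / 2 :=
      PySem.Int.floordiv_eq_ediv_of_pos (by norm_num)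
    rw [hfd]
    have hA : (PySem.List.pyRange 1 m 1).foldl
        (fun roots i => if PySem.Int.mod (i * i) m = a' then roots ++ PySem.Int.toStr i ++ " " else roots) ""
        = PySem.Str.join "" (((PySem.List.pyRange 1 m 1).filter
            (fun i => decide (PySem.Int.mod (i * i) m = a'))).map
              (fun i => PySem.Int.toStr i ++ " ")) := by
      rw [show (fun (roots : String) i =>
            if PySem.Int.mod (i * i) m = a' then roots ++ PySem.Int.toStr i ++ " " else roots)
          = (fun (roots : String) i =>
            if PySem.Int.mod (i * i) m = a' then roots ++ (PySem.Int.toStr i ++ " ") else roots) from by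
        funext r i; rw [String.append_assoc]]
      rw [pv_foldl_str, String.empty_append]
    rw [hA, PySem.List.foldl_append_ite_eq_filter, List.nil_append,
      ← pv_split m hm _ (fun i => by
        simp only [decide_eq_decide]
        rw [pv_sq_symm m i hm])]
    by_cases hnil : (PySem.List.pyRange 1 m 1).filter
        (fun i => decide (PySem.Int.mod (i * i) m = a')) = []
    · rw [hnil]; simp [pv_join_nil]
    · rw [if_neg (pv_join_parts_ne_nil _ (fun i => pv_f_ne_nil i) _ hnil),
        if_neg (by simp [List.isEmpty_iff, hnil])]
  · have h1 : PySem.List.pyRange 1 m 1 = [] :=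
      PySem.List.pyRange_one_eq_nil (by omega)
    have hfd : PySem.Int.floordiv m 2 = m / 2 :=
      PySem.Int.floordiv_eq_ediv_of_pos (by norm_num)
    have h2 : PySem.List.pyRange 1 (PySem.Int.floordiv m 2 + 1) 1 = [] :=
      PySem.List.pyRange_one_eq_nil (by rw [hfd]; omega)
    rw [h1, h2]
    simp
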